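-- pv_equiv track=rewrite | github.com/christofmuc/KnobKraft-orm | adaptions/roland/__init__.py | size_to_number
-- ===== SOURCE A (Python) =====
-- def size_to_number(size) -> int:
--     if isinstance(size, tuple):
--         num_values = len(size)
--         result = 0
--         for i in range(num_values):
--             result += size[i] << (7 * (num_values - 1 - i))
--         return result
--     else:
--         return size
-- ===== SOURCE B (Python) =====
-- def size_to_number(size) -> int:
--     if isinstance(size, tuple):
--         result = 0
--         for v in size:
--             result = result * 128 + v
--         return result
--     else:
--         return size
-- ===== Notes on version B (the rewrite author's own statement) =====
-- stated objective: idiomatic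
-- what changed: Replaces the index-based loop of independently computed positional shift terms (size[i] << 7*(n-1-i)) by a Horner-style accumulator that iterates directly over the elements doing result = result*128 + v, needing no length or index bookkeeping.
import Mathlib
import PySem

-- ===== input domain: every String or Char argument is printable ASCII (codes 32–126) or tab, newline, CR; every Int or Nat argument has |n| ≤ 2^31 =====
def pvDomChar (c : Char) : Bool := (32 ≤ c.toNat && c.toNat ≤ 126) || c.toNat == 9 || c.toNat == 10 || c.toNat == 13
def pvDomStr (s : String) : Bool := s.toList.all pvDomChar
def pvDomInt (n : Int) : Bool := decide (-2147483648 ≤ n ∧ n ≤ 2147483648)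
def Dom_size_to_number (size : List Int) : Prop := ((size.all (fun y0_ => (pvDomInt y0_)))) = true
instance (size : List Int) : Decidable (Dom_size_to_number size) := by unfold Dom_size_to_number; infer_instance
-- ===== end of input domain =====

-- B replaces A's indexed positional-shift loop with a Horner-style accumulator (result = result*128 + v) for idiomatic simplicity; same O(n) loop.

-- ===== PORT A =====
-- for i in range(num_values): result += size[i] << (7 * (num_values - 1 - i))
def size_to_number (size : List Int) : Int :=
  let num_values : Int := size.length
  (PySem.List.pyRange 0 num_values 1).foldl
    (fun result i =>
      result + (PySem.List.pyGetD size i 0) <<< (7 * (num_values - 1 - i)).toNat) 0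

-- ===== PORT B =====
-- result = 0; for v in size: result = result * 128 + v
def size_to_number_alt (size : List Int) : Int :=
  size.foldl (fun result v => result * 128 + v) 0

-- ===== PRECONDITION & SPEC =====
def Spec_size_to_number (size : List Int) (out : Int) : Prop := out = size_to_number_alt size
instance (size : List Int) (out : Int) : Decidable (Spec_size_to_number size out) := by unfold Spec_size_to_number; infer_instance

-- ===== CLAIM (what is proved, stated in full; the proofs are below) =====
def Claim_equal_size_to_number : Prop := ∀ (size : List Int), Dom_size_to_number size → Spec_size_to_number size (size_to_number size)

-- ===== LEMMAS AND PROOFS =====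

-- A as an explicit sum of positional terms
theorem size_to_number_eq_sum (size : List Int) :
    size_to_number size =
      ((PySem.List.pyRange 0 (size.length : Int) 1).map
        (fun i => PySem.List.pyGetD size i 0 * 2 ^ (7 * ((size.length : Int) - 1 - i)).toNat)).sum := by
  unfold size_to_number
  simp only [Int.shiftLeft_eq]
  rw [PySem.List.foldl_add]
  simp

-- appending one element multiplies A's positional sum by 128 and adds the element
theorem sum_concat (t : List Int) (v : Int) :
    ((PySem.List.pyRange 0 ((t ++ [v]).length : Int) 1).map
      (fun i => PySem.List.pyGetD (t ++ [v]) i 0 * 2 ^ (7 * (((t ++ [v]).length : Int) - 1 - i)).toNat)).sum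
    = 128 * ((PySem.List.pyRange 0 (t.length : Int) 1).map
        (fun i => PySem.List.pyGetD t i 0 * 2 ^ (7 * ((t.length : Int) - 1 - i)).toNat)).sum + v := by
  have hlen : ((t ++ [v]).length : Int) = (t.length : Int) + 1 := by
    simp
  rw [hlen, PySem.List.pyRange_one_succ_right (by omega : (0:Int) ≤ (t.length : Int)),
    List.map_append, List.sum_append]
  have hlast :
      ([((t.length : Int))].map
        (fun i => PySem.List.pyGetD (t ++ [v]) i 0 * 2 ^ (7 * ((t.length : Int) + 1 - 1 - i)).toNat)).sum = v := by
    simp [PySem.List.pyGetD_natCast]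
  rw [hlast]
  congr 1
  have hmap : (PySem.List.pyRange 0 (t.length : Int) 1).map
      (fun i => PySem.List.pyGetD (t ++ [v]) i 0 * 2 ^ (7 * ((t.length : Int) + 1 - 1 - i)).toNat)
    = (PySem.List.pyRange 0 (t.length : Int) 1).map
      (fun i => 128 * (PySem.List.pyGetD t i 0 * 2 ^ (7 * ((t.length : Int) - 1 - i)).toNat)) := by
    apply List.map_congr_left
    intro i hi
    rw [PySem.List.mem_pyRange_one] at hi
    obtain ⟨h0, h1⟩ := hi
    obtain ⟨k, rfl⟩ : ∃ k : Nat, i = (k : Int) := ⟨i.toNat, (Int.toNat_of_nonneg h0).symm⟩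
    have hk : k < t.length := by exact_mod_cast h1
    have hget : PySem.List.pyGetD (t ++ [v]) (k : Int) 0 = PySem.List.pyGetD t (k : Int) 0 := by
      simp [PySem.List.pyGetD_natCast, List.getD, List.getElem?_append_left hk]
    have hexp : (7 * ((t.length : Int) + 1 - 1 - (k : Int))).toNat
        = (7 * ((t.length : Int) - 1 - (k : Int))).toNat + 7 := by omega
    rw [hget, hexp, pow_add]
    ring
  rw [hmap, List.sum_map_mul_left]

-- Horner fold over an appended element
theorem horner_concat (t : List Int) (v a : Int) :
    (t ++ [v]).foldl (fun result w => result * 128 + w) a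
      = (t.foldl (fun result w => result * 128 + w) a) * 128 + v := by
  rw [List.foldl_append]
  rfl

theorem size_to_number_eq_alt (size : List Int) :
    size_to_number size = size_to_number_alt size := by
  induction size using List.reverseRecOn with
  | nil => rfl
  | append_singleton t v ih =>
    rw [size_to_number_eq_sum, sum_concat]
    unfold size_to_number_alt
    rw [horner_concat]
    rw [size_to_number_eq_sum] at ih
    rw [ih]
    unfold size_to_number_alt
    ring

-- ===== VERDICT (by name: the statement is the Claim_ definition above) =====
theorem size_to_number_spec : Claim_equal_size_to_number := by
  intro size _
  exact size_to_number_eq_alt size
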